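-- pv_equiv track=rewrite | github.com/renatodru/quadrado-magico | tst.py | gerador_old
-- ===== SOURCE A (Python) =====
-- def gerador_old(testes):
--     base = list(range(1,17))
--     matriz = [[a,b,c,d] for a in base for b in base for c in base for d in base if(a+b+c+d)==34 and len(list(set([a,b,c,d])))==4]#cria todas as combinações possiveis de 4 elementos não repetidos que somam 34
--     achado = []
--     a = 0
--     for x in matriz:
--         for w in matriz:
--             if len(list(set(x+w)))==8:
--                 for y in matriz:
--                     if len(list(set(x+w+y)))==12:
--                         for z in matriz:
--                             if len(list(set(x+w+y+z)))==16:
--                                 a += 1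
--                                 achado.append([x,w,y,z])
--                                 if a == testes:return achado
-- ===== SOURCE B (Python) =====
-- def _perms4(vals):
--     out = []
--     for p in vals:
--         for q in vals:
--             if q != p:
--                 for r in vals:
--                     if r != p and r != q:
--                         for s in vals:
--                             if s != p and s != q and s != r:
--                                 out.append([p, q, r, s])
--     return out
--
--
-- def _solutions(rows):
--     for x in rows:
--         sx = set(x)
--         for w in rows:
--             if sx.isdisjoint(w):
--                 sxw = sx | set(w)
--                 for y in rows:
--                     if sxw.isdisjoint(y):
--                         used = sxw | set(y)
--                         rest = [v for v in range(1, 17) if v not in used]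
--                         for z in _perms4(rest):
--                             yield [x, w, y, z]
--
--
-- def gerador_old(testes):
--     if testes < 1:
--         return None
--     rows = []
--     for a in range(1, 17):
--         for b in range(1, 17):
--             for c in range(1, 17):
--                 d = 34 - a - b - c
--                 if 1 <= d <= 16 and len({a, b, c, d}) == 4:
--                     rows.append([a, b, c, d])
--     found = []
--     for sol in _solutions(rows):
--         found.append(sol)
--         if len(found) == testes:
--             return found
--     return None
-- ===== Notes on version B (the rewrite author's own statement) =====
-- stated objective: faster
-- what changed: B builds the candidate rows with a closed-form fourth element (no fourth nested row loop), generates solutions as a lazy stream whose last row is enumerated directly as the permutations of the four remaining numbers of 1..16 (instead of A's scan of the whole 2064-row list with a 16-element dedup per candidate), and the caller simply takes the first `testes` solutions from the stream.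
import Mathlib
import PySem

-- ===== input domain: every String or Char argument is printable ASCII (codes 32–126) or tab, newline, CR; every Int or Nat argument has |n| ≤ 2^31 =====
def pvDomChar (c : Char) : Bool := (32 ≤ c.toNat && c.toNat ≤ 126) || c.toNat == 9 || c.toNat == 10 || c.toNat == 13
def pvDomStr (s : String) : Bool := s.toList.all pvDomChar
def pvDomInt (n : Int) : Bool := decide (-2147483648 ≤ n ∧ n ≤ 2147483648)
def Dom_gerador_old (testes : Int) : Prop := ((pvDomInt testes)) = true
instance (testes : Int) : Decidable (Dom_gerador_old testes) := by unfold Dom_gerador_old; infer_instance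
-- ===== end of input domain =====

-- B generates the solution stream lazily (rows built with a closed-form fourth element, the last
-- magic row enumerated as the permutations of the four remaining numbers instead of a scan of the
-- whole row list) and the caller takes the first `testes` of it: measurably faster than A.

-- ===== PORT A =====
def pvBaseA : List Int := PySem.List.pyRange 1 17 1

def pvMatrizA : List (List Int) :=
  pvBaseA.flatMap fun a => pvBaseA.flatMap fun b => pvBaseA.flatMap fun c => pvBaseA.flatMap fun d =>
    if a + b + c + d == 34 && (PySem.Set.ofList [a, b, c, d]).length == 4 then [[a, b, c, d]] else []

def pvAloopZ (testes : Int) (x w y : List Int) :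
    List (List Int) → List (List (List Int)) × Int →
      (List (List (List Int)) × Int) ⊕ (List (List (List Int)))
  | [], st => Sum.inl st
  | z :: zs, (achado, cnt) =>
    if (PySem.Set.ofList (((x ++ w) ++ y) ++ z)).length == 16 then
      let cnt' := cnt + 1
      let achado' := achado ++ [[x, w, y, z]]
      if cnt' == testes then Sum.inr achado'
      else pvAloopZ testes x w y zs (achado', cnt')
    else pvAloopZ testes x w y zs (achado, cnt)

def pvAloopY (testes : Int) (m : List (List Int)) (x w : List Int) :
    List (List Int) → List (List (List Int)) × Int →
      (List (List (List Int)) × Int) ⊕ (List (List (List Int)))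
  | [], st => Sum.inl st
  | y :: ys, st =>
    if (PySem.Set.ofList ((x ++ w) ++ y)).length == 12 then
      match pvAloopZ testes x w y m st with
      | Sum.inl st' => pvAloopY testes m x w ys st'
      | Sum.inr r => Sum.inr r
    else pvAloopY testes m x w ys st

def pvAloopW (testes : Int) (m : List (List Int)) (x : List Int) :
    List (List Int) → List (List (List Int)) × Int →
      (List (List (List Int)) × Int) ⊕ (List (List (List Int)))
  | [], st => Sum.inl st
  | w :: ws, st =>
    if (PySem.Set.ofList (x ++ w)).length == 8 then
      match pvAloopY testes m x w m st with
      | Sum.inl st' => pvAloopW testes m x ws st'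
      | Sum.inr r => Sum.inr r
    else pvAloopW testes m x ws st

def pvAloopX (testes : Int) (m : List (List Int)) :
    List (List Int) → List (List (List Int)) × Int →
      (List (List (List Int)) × Int) ⊕ (List (List (List Int)))
  | [], st => Sum.inl st
  | x :: xs, st =>
    match pvAloopW testes m x m st with
    | Sum.inl st' => pvAloopX testes m xs st'
    | Sum.inr r => Sum.inr r

def gerador_old (testes : Int) : Option (List (List (List Int))) :=
  match pvAloopX testes pvMatrizA pvMatrizA ([], 0) with
  | Sum.inl _ => none
  | Sum.inr r => some r

-- ===== PORT B =====
-- rows: the fourth entry is the closed form 34 - a - b - c (no d loop)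
def pvRowsB : List (List Int) :=
  (PySem.List.pyRange 1 17 1).flatMap fun a =>
    (PySem.List.pyRange 1 17 1).flatMap fun b =>
      (PySem.List.pyRange 1 17 1).flatMap fun c =>
        let d := 34 - a - b - c
        if 1 ≤ d ∧ d ≤ 16 ∧ (PySem.Set.ofList [a, b, c, d]).length = 4 then [[a, b, c, d]] else []

def pvPerms4 (vals : List Int) : List (List Int) :=
  vals.flatMap fun p =>
    vals.flatMap fun q =>
      if q ≠ p then
        vals.flatMap fun r =>
          if r ≠ p ∧ r ≠ q then
            vals.flatMap fun s =>
              if s ≠ p ∧ s ≠ q ∧ s ≠ r then [[p, q, r, s]] else []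
          else []
      else []

-- Source B's generator `_solutions` consumed with an early stop after `testes` elements is rendered,
-- exactly, as budget-limited production: each level yields at most `n` solutions and passes the
-- unused budget on (Lean has no lazy generators).
def pvGenY (x w : List Int) (sxw : PySem.Set Int) : Nat → List (List Int) → List (List (List Int))
  | _, [] => []
  | 0, _ :: _ => []
  | n + 1, y :: ys =>
    if PySem.Set.isdisjoint sxw y then
      let used := PySem.Set.union sxw y
      let rest := (PySem.List.pyRange 1 17 1).filter fun v => !(PySem.Set.contains used v)
      let here := ((pvPerms4 rest).map fun z => [x, w, y, z]).take (n + 1)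
      here ++ pvGenY x w sxw (n + 1 - here.length) ys
    else pvGenY x w sxw (n + 1) ys

def pvGenW (x : List Int) (sx : PySem.Set Int) (rows : List (List Int)) :
    Nat → List (List Int) → List (List (List Int))
  | _, [] => []
  | 0, _ :: _ => []
  | n + 1, w :: ws =>
    if PySem.Set.isdisjoint sx w then
      let here := pvGenY x w (PySem.Set.union sx w) (n + 1) rows
      here ++ pvGenW x sx rows (n + 1 - here.length) ws
    else pvGenW x sx rows (n + 1) ws

def pvGenX (rows : List (List Int)) : Nat → List (List Int) → List (List (List Int))
  | _, [] => []
  | 0, _ :: _ => []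
  | n + 1, x :: xs =>
    let here := pvGenW x (PySem.Set.ofList x) rows (n + 1) rows
    here ++ pvGenX rows (n + 1 - here.length) xs

def gerador_old_alt (testes : Int) : Option (List (List (List Int))) :=
  if testes < 1 then none
  else
    let found := pvGenX pvRowsB testes.toNat pvRowsB
    if (found.length : Int) == testes then some found else none

-- ===== PRECONDITION & SPEC =====
def Spec_gerador_old (testes : Int) (out : Option (List (List (List Int)))) : Prop := out = gerador_old_alt testes
instance (testes : Int) (out : Option (List (List (List Int)))) : Decidable (Spec_gerador_old testes out) := by unfold Spec_gerador_old; infer_instance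

-- ===== CLAIM (what is proved, stated in full; the proofs are below) =====
def Claim_equal_gerador_old : Prop := ∀ (testes : Int), Dom_gerador_old testes → Spec_gerador_old testes (gerador_old testes)

-- ===== LEMMAS AND PROOFS =====

-- a "good row": what membership in the row list guarantees
def pvRowOK (r : List Int) : Prop :=
  r.length = 4 ∧ r.toFinset.card = 4 ∧ r.sum = 34 ∧ ∀ v ∈ r, v ∈ pvBaseA

def pvQuad (l : List Int) (P : Int → Int → Int → Int → Bool) : List (List Int) :=
  l.flatMap fun a => l.flatMap fun b => l.flatMap fun c => l.flatMap fun d =>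
    if P a b c d then [[a, b, c, d]] else []

lemma pv_setLen (l : List Int) : (PySem.Set.ofList l).length = l.toFinset.card := by
  have hnd := PySem.Set.nodup_ofList l
  have hts : (PySem.Set.ofList l).toFinset = l.toFinset := by
    ext a; simp [List.mem_toFinset, PySem.Set.mem_ofList]
  rw [← hts, List.toFinset_card_of_nodup hnd]

lemma pv_nodup_of_card (l : List Int) (h : l.toFinset.card = l.length) : l.Nodup := by
  refine List.dedup_eq_self.mp ((List.dedup_sublist l).eq_of_length ?_)
  rw [← List.card_toFinset, h]

lemma pv_flatMap_congr_mem {α β : Type} (l : List α) (f g : α → List β)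
    (h : ∀ a ∈ l, f a = g a) : l.flatMap f = l.flatMap g := by
  induction l with
  | nil => rfl
  | cons a t ih =>
    simp only [List.flatMap_cons]
    rw [h a (by simp), ih fun a ha => h a (by simp [ha])]

lemma pv_filter_flatMap {α β : Type} (l : List α) (f : α → List β) (p : β → Bool) :
    (l.flatMap f).filter p = l.flatMap fun a => (f a).filter p := by
  induction l with
  | nil => rfl
  | cons a t ih => simp [List.flatMap_cons, List.filter_append, ih]

lemma pv_flatMap_filter {α β : Type} (l : List α) (p : α → Bool) (f : α → List β) :
    (l.filter p).flatMap f = l.flatMap fun a => if p a then f a else [] := by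
  induction l with
  | nil => rfl
  | cons a t ih =>
    by_cases h : p a <;> simp [h, ih]

lemma pv_flatMap_empty {α β : Type} (l : List α) : l.flatMap (fun _ => ([] : List β)) = [] := by
  simp

lemma pv_matriz_filter (p : List Int → Bool) :
    pvMatrizA.filter p = pvQuad pvBaseA fun a b c d =>
      (a + b + c + d == 34 && (PySem.Set.ofList [a, b, c, d]).length == 4) && p [a, b, c, d] := by
  unfold pvMatrizA pvQuad
  simp only [pv_filter_flatMap]
  refine pv_flatMap_congr_mem _ _ _ fun a _ => ?_
  refine pv_flatMap_congr_mem _ _ _ fun b _ => ?_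
  refine pv_flatMap_congr_mem _ _ _ fun c _ => ?_
  refine pv_flatMap_congr_mem _ _ _ fun d _ => ?_
  by_cases h34 : a + b + c + d = 34 <;>
    by_cases hd4 : (PySem.Set.ofList [a, b, c, d]).length = 4 <;>
      by_cases hp : p [a, b, c, d] = true <;>
        simp [h34, hd4, hp]

lemma pv_quad_filter (l : List Int) (p : Int → Bool) (P : Int → Int → Int → Int → Bool) :
    pvQuad (l.filter p) P = pvQuad l fun a b c d => ((p a && p b) && (p c && p d)) && P a b c d := by
  unfold pvQuad
  simp only [pv_flatMap_filter]
  refine pv_flatMap_congr_mem _ _ _ fun a _ => ?_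
  by_cases ha : p a = true
  · rw [if_pos ha]
    refine pv_flatMap_congr_mem _ _ _ fun b _ => ?_
    by_cases hb : p b = true
    · rw [if_pos hb]
      refine pv_flatMap_congr_mem _ _ _ fun c _ => ?_
      by_cases hc : p c = true
      · rw [if_pos hc]
        refine pv_flatMap_congr_mem _ _ _ fun d _ => ?_
        by_cases hd : p d = true <;> simp [ha, hb, hc, hd]
      · rw [if_neg hc]; symm; simp [hc, pv_flatMap_empty]
    · rw [if_neg hb]; symm; simp [hb, pv_flatMap_empty]
  · rw [if_neg ha]; symm; simp [ha, pv_flatMap_empty]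

lemma pv_quad_congr_mem (l : List Int) (P Q : Int → Int → Int → Int → Bool)
    (h : ∀ a ∈ l, ∀ b ∈ l, ∀ c ∈ l, ∀ d ∈ l, P a b c d = Q a b c d) :
    pvQuad l P = pvQuad l Q := by
  unfold pvQuad
  refine pv_flatMap_congr_mem _ _ _ fun a ha => ?_
  refine pv_flatMap_congr_mem _ _ _ fun b hb => ?_
  refine pv_flatMap_congr_mem _ _ _ fun c hc => ?_
  refine pv_flatMap_congr_mem _ _ _ fun d hd => ?_
  rw [h a ha b hb c hc d hd]

lemma pv_rowOK_matriz : ∀ r ∈ pvMatrizA, pvRowOK r := by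
  intro r hr
  unfold pvMatrizA at hr
  simp only [List.mem_flatMap] at hr
  obtain ⟨a, ha, b, hb, c, hc, d, hd, hmem⟩ := hr
  split_ifs at hmem with h
  · simp only [List.mem_singleton] at hmem
    simp only [Bool.and_eq_true, beq_iff_eq] at h
    obtain ⟨h34, hd4⟩ := h
    subst hmem
    refine ⟨rfl, ?_, ?_, ?_⟩
    · rw [← pv_setLen]; exact hd4
    · simp only [List.sum_cons, List.sum_nil]; omega
    · intro v hv
      simp only [List.mem_cons, List.not_mem_nil, or_false] at hv
      rcases hv with rfl | rfl | rfl | rfl <;> assumption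
  · simp at hmem

-- the central combinatorial fact: scanning the row list for a disjoint fourth row
-- is exactly enumerating the distinct 4-tuples over the 4 remaining numbers
lemma pv_zlist_eq (x w y : List Int) (hx : pvRowOK x) (hw : pvRowOK w) (hy : pvRowOK y)
    (h12 : (((x ++ w) ++ y)).toFinset.card = 12) :
    pvMatrizA.filter (fun z => (PySem.Set.ofList (((x ++ w) ++ y) ++ z)).length == 16)
      = pvQuad (pvBaseA.filter fun v => decide (v ∉ (x ++ w) ++ y))
          (fun p q r s => (PySem.Set.ofList [p, q, r, s]).length == 4) := by
  have hUlen : ((x ++ w) ++ y).length = 12 := by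
    simp [hx.1, hw.1, hy.1]
  have hUnd : ((x ++ w) ++ y).Nodup := pv_nodup_of_card _ (by rw [h12, hUlen])
  have hUsub : ((x ++ w) ++ y).toFinset ⊆ pvBaseA.toFinset := by
    intro v hv
    rw [List.mem_toFinset] at hv
    rw [List.mem_toFinset]
    simp only [List.mem_append] at hv
    rcases hv with (hv | hv) | hv
    exacts [hx.2.2.2 v hv, hw.2.2.2 v hv, hy.2.2.2 v hv]
  have hbasecard : pvBaseA.toFinset.card = 16 := by decide
  have hbasesum : ∑ v ∈ pvBaseA.toFinset, v = 136 := by decide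
  have hUsum : ∑ v ∈ ((x ++ w) ++ y).toFinset, v = 102 := by
    rw [List.sum_toFinset _ hUnd]
    simp only [List.map_id']
    rw [List.sum_append, List.sum_append, hx.2.2.1, hw.2.2.1, hy.2.2.1]
    norm_num
  rw [pv_matriz_filter, pv_quad_filter]
  refine pv_quad_congr_mem _ _ _ fun a ha b hb c hc d hd => ?_
  rw [Bool.eq_iff_iff]
  simp only [Bool.and_eq_true, beq_iff_eq, decide_eq_true_eq, pv_setLen]
  have key := Finset.card_union_add_card_inter ((x ++ w) ++ y).toFinset ([a, b, c, d] : List Int).toFinset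
  have hVle : ([a, b, c, d] : List Int).toFinset.card ≤ 4 := List.toFinset_card_le _
  constructor
  · rintro ⟨⟨h34, hV4⟩, h16⟩
    rw [List.toFinset_append] at h16
    have h0 : (((x ++ w) ++ y).toFinset ∩ ([a, b, c, d] : List Int).toFinset).card = 0 := by omega
    rw [Finset.card_eq_zero] at h0
    have hnot : ∀ v ∈ ([a, b, c, d] : List Int), v ∉ (x ++ w) ++ y := by
      intro v hv hvU
      have hmem : v ∈ ((x ++ w) ++ y).toFinset ∩ ([a, b, c, d] : List Int).toFinset :=
        Finset.mem_inter.mpr ⟨List.mem_toFinset.mpr hvU, List.mem_toFinset.mpr hv⟩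
      rw [h0] at hmem
      exact absurd hmem (Finset.notMem_empty v)
    exact ⟨⟨⟨hnot a (by simp), hnot b (by simp)⟩, hnot c (by simp), hnot d (by simp)⟩, hV4⟩
  · rintro ⟨⟨⟨hna, hnb⟩, hnc, hnd⟩, hV4⟩
    have h0 : ((x ++ w) ++ y).toFinset ∩ ([a, b, c, d] : List Int).toFinset = ∅ := by
      ext v
      simp only [Finset.mem_inter, List.mem_toFinset, Finset.notMem_empty, iff_false, not_and]
      intro hvU hv
      simp only [List.mem_cons, List.not_mem_nil, or_false] at hv
      rcases hv with rfl | rfl | rfl | rfl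
      exacts [hna hvU, hnb hvU, hnc hvU, hnd hvU]
    rw [h0, Finset.card_empty] at key
    refine ⟨⟨?_, hV4⟩, ?_⟩
    · have hVnd : ([a, b, c, d] : List Int).Nodup := pv_nodup_of_card _ (by rw [hV4]; rfl)
      have hsubV : ([a, b, c, d] : List Int).toFinset ⊆
          pvBaseA.toFinset \ ((x ++ w) ++ y).toFinset := by
        intro v hv
        rw [List.mem_toFinset] at hv
        simp only [List.mem_cons, List.not_mem_nil, or_false] at hv
        rw [Finset.mem_sdiff]
        rcases hv with rfl | rfl | rfl | rfl
        · exact ⟨List.mem_toFinset.mpr ha, fun hh => hna (List.mem_toFinset.mp hh)⟩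
        · exact ⟨List.mem_toFinset.mpr hb, fun hh => hnb (List.mem_toFinset.mp hh)⟩
        · exact ⟨List.mem_toFinset.mpr hc, fun hh => hnc (List.mem_toFinset.mp hh)⟩
        · exact ⟨List.mem_toFinset.mpr hd, fun hh => hnd (List.mem_toFinset.mp hh)⟩
      have hcardS : (pvBaseA.toFinset \ ((x ++ w) ++ y).toFinset).card = 4 := by
        rw [Finset.card_sdiff, Finset.inter_eq_left.mpr hUsub, hbasecard, h12]
      have hVeq : ([a, b, c, d] : List Int).toFinset =
          pvBaseA.toFinset \ ((x ++ w) ++ y).toFinset :=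
        Finset.eq_of_subset_of_card_le hsubV (le_of_eq (hcardS.trans hV4.symm))
      have hsumV : ∑ v ∈ ([a, b, c, d] : List Int).toFinset, v = a + b + c + d := by
        rw [List.sum_toFinset _ hVnd]
        simp only [List.map_id', List.sum_cons, List.sum_nil]
        ring
      rw [hVeq, Finset.sum_sdiff_eq_sub hUsub, hbasesum, hUsum] at hsumV
      omega
    · rw [List.toFinset_append]
      omega

-- B's rest list is the filtered base list
lemma pv_rest_eq (x w y : List Int) :
    ((PySem.List.pyRange 1 17 1).filter fun v =>
        !(PySem.Set.contains (PySem.Set.union (PySem.Set.union (PySem.Set.ofList x) w) y) v))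
      = pvBaseA.filter fun v => decide (v ∉ (x ++ w) ++ y) := by
  refine List.filter_congr fun v _ => ?_
  simp [Bool.and_assoc]

-- guard equivalences
lemma pv_guardW (x w : List Int) (hx : pvRowOK x) (hw : pvRowOK w) :
    ((PySem.Set.ofList (x ++ w)).length == 8) = PySem.Set.isdisjoint (PySem.Set.ofList x) w := by
  rw [Bool.eq_iff_iff, beq_iff_eq, PySem.Set.isdisjoint_iff, pv_setLen]
  have hxc := hx.2.1
  have hwc := hw.2.1
  have key := Finset.card_union_add_card_inter x.toFinset w.toFinset
  constructor
  · intro h8 v hvx hvw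
    have hvx' : v ∈ x := (PySem.Set.mem_ofList x v).mp hvx
    rw [List.toFinset_append] at h8
    have h0 : (x.toFinset ∩ w.toFinset).card = 0 := by omega
    rw [Finset.card_eq_zero] at h0
    have hmem : v ∈ x.toFinset ∩ w.toFinset :=
      Finset.mem_inter.mpr ⟨List.mem_toFinset.mpr hvx', List.mem_toFinset.mpr hvw⟩
    rw [h0] at hmem
    exact absurd hmem (Finset.notMem_empty v)
  · intro hd
    have h0 : x.toFinset ∩ w.toFinset = ∅ := by
      ext v
      simp only [Finset.mem_inter, List.mem_toFinset, Finset.notMem_empty, iff_false, not_and]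
      intro h1 h2
      exact hd v ((PySem.Set.mem_ofList x v).mpr h1) h2
    rw [List.toFinset_append]
    rw [h0, Finset.card_empty] at key
    omega

lemma pv_guardY (x w y : List Int) (hy : pvRowOK y)
    (h8 : (x ++ w).toFinset.card = 8) :
    ((PySem.Set.ofList ((x ++ w) ++ y)).length == 12)
      = PySem.Set.isdisjoint (PySem.Set.union (PySem.Set.ofList x) w) y := by
  rw [Bool.eq_iff_iff, beq_iff_eq, PySem.Set.isdisjoint_iff, pv_setLen]
  have hyc := hy.2.1
  have key := Finset.card_union_add_card_inter (x ++ w).toFinset y.toFinset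
  constructor
  · intro h12 v hv hvy
    have hv' : v ∈ x ++ w := by
      simp only [PySem.Set.mem_union, PySem.Set.mem_ofList] at hv
      simp only [List.mem_append]
      tauto
    rw [List.toFinset_append] at h12
    have h0 : ((x ++ w).toFinset ∩ y.toFinset).card = 0 := by omega
    rw [Finset.card_eq_zero] at h0
    have hmem : v ∈ (x ++ w).toFinset ∩ y.toFinset :=
      Finset.mem_inter.mpr ⟨List.mem_toFinset.mpr hv', List.mem_toFinset.mpr hvy⟩
    rw [h0] at hmem
    exact absurd hmem (Finset.notMem_empty v)
  · intro hd
    have h0 : (x ++ w).toFinset ∩ y.toFinset = ∅ := by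
      ext v
      simp only [Finset.mem_inter, List.mem_toFinset, Finset.notMem_empty, iff_false, not_and]
      intro h1 h2
      refine hd v ?_ h2
      simp only [PySem.Set.mem_union, PySem.Set.mem_ofList]
      simp only [List.mem_append] at h1
      tauto
    rw [List.toFinset_append]
    rw [h0, Finset.card_empty] at key
    omega

-- ===== the two row lists are the same list =====
lemma pv_pick (s : Int) (g : Int → List (List Int)) :
    ∀ (l : List Int), l.Nodup →
      (l.flatMap fun d => if s + d == 34 then g d else []) =
      (if (34 - s) ∈ l then g (34 - s) else []) := by
  intro l
  induction l with
  | nil => intro _; simp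
  | cons a t ih =>
    intro hnd
    rw [List.nodup_cons] at hnd
    simp only [List.flatMap_cons]
    by_cases ha : s + a = 34
    · have haa : a = 34 - s := by omega
      have ht : (t.flatMap fun d => if s + d == 34 then g d else []) = [] := by
        rw [ih hnd.2, if_neg]
        rw [← haa]; exact hnd.1
      rw [if_pos (by simpa using ha), ht, List.append_nil,
          if_pos (by rw [← haa]; exact List.mem_cons_self), ← haa]
    · have hne : (34 - s) ≠ a := by omega
      rw [if_neg (by simpa using ha), List.nil_append, ih hnd.2]
      by_cases hm : (34 - s) ∈ t
      · rw [if_pos hm, if_pos (List.mem_cons_of_mem a hm)]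
      · rw [if_neg hm, if_neg (by simp [List.mem_cons, hne, hm])]

lemma pv_base_nodup : pvBaseA.Nodup := by decide

lemma pv_base_mem (v : Int) : v ∈ pvBaseA ↔ (1 ≤ v ∧ v ≤ 16) := by
  have hb : pvBaseA = [1,2,3,4,5,6,7,8,9,10,11,12,13,14,15,16] := by decide
  rw [hb]
  simp only [List.mem_cons, List.not_mem_nil, or_false]
  omega

lemma pv_rows_eq : pvRowsB = pvMatrizA := by
  unfold pvRowsB pvMatrizA
  rw [show (PySem.List.pyRange 1 17 1) = pvBaseA from rfl]
  refine pv_flatMap_congr_mem _ _ _ fun a _ => ?_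
  refine pv_flatMap_congr_mem _ _ _ fun b _ => ?_
  refine pv_flatMap_congr_mem _ _ _ fun c _ => ?_
  have hsplit : ∀ d : Int,
      (if a + b + c + d == 34 && ((PySem.Set.ofList [a, b, c, d]).length == 4)
        then [[a, b, c, d]] else ([] : List (List Int)))
      = (if (a + b + c) + d == 34 then
          (if (PySem.Set.ofList [a, b, c, d]).length = 4 then [[a, b, c, d]] else []) else []) := by
    intro d
    by_cases h1 : a + b + c + d = 34 <;>
      by_cases h2 : (PySem.Set.ofList [a, b, c, d]).length = 4 <;>
        simp [h1, h2]
  rw [pv_flatMap_congr_mem _ _ _ fun d _ => hsplit d,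
      pv_pick (a + b + c) _ pvBaseA pv_base_nodup]
  have he : (34 : Int) - a - b - c = 34 - (a + b + c) := by ring
  simp only [he, pv_base_mem]
  by_cases hr : 1 ≤ 34 - (a + b + c) ∧ 34 - (a + b + c) ≤ 16
  · by_cases hc4 : (PySem.Set.ofList [a, b, c, 34 - (a + b + c)]).length = 4 <;>
      simp [hr, hc4]
  · rw [if_neg hr, if_neg (by tauto)]

-- ===== perms4 is the pvQuad with the set-cardinality condition =====
lemma pv_card4 (p q r s : Int) :
    ((PySem.Set.ofList [p, q, r, s]).length = 4) ↔
      (q ≠ p ∧ (r ≠ p ∧ r ≠ q) ∧ (s ≠ p ∧ s ≠ q ∧ s ≠ r)) := by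
  rw [pv_setLen]
  constructor
  · intro h
    have nd := pv_nodup_of_card [p, q, r, s] (by simpa using h)
    simp only [List.nodup_cons, List.mem_cons, List.not_mem_nil, or_false, not_or] at nd
    refine ⟨fun hh => nd.1.1 hh.symm, ⟨fun hh => nd.1.2.1 hh.symm, fun hh => nd.2.1.1 hh.symm⟩,
      fun hh => nd.1.2.2 hh.symm, fun hh => nd.2.1.2 hh.symm, fun hh => nd.2.2.1 hh.symm⟩
  · intro h
    have nd : ([p, q, r, s] : List Int).Nodup := by
      refine List.nodup_cons.mpr ⟨?_, List.nodup_cons.mpr ⟨?_, List.nodup_cons.mpr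
        ⟨?_, List.nodup_singleton s⟩⟩⟩ <;>
          simp only [List.mem_cons, List.not_mem_nil, or_false, not_or]
      · exact ⟨fun e => h.1 e.symm, fun e => h.2.1.1 e.symm, fun e => h.2.2.1 e.symm⟩
      · exact ⟨fun e => h.2.1.2 e.symm, fun e => h.2.2.2.1 e.symm⟩
      · exact fun e => h.2.2.2.2 e.symm
    rw [List.toFinset_card_of_nodup nd]; rfl

lemma pv_perms4_quad (vals : List Int) :
    pvPerms4 vals = pvQuad vals fun p q r s => (PySem.Set.ofList [p, q, r, s]).length == 4 := by
  unfold pvPerms4 pvQuad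
  refine pv_flatMap_congr_mem _ _ _ fun p _ => ?_
  refine pv_flatMap_congr_mem _ _ _ fun q _ => ?_
  by_cases hq : q ≠ p
  · rw [if_pos hq]
    refine pv_flatMap_congr_mem _ _ _ fun r _ => ?_
    by_cases hrr : r ≠ p ∧ r ≠ q
    · rw [if_pos hrr]
      refine pv_flatMap_congr_mem _ _ _ fun s _ => ?_
      by_cases hs : s ≠ p ∧ s ≠ q ∧ s ≠ r
      · rw [if_pos hs, if_pos (by rw [beq_iff_eq, pv_card4]; exact ⟨hq, hrr, hs⟩)]
      · rw [if_neg hs, if_neg (by rw [beq_iff_eq, pv_card4]; tauto)]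
    · rw [if_neg hrr]; symm
      rw [pv_flatMap_congr_mem _ _ (fun _ => []) fun s _ => by
        rw [if_neg (by rw [beq_iff_eq, pv_card4]; tauto)], pv_flatMap_empty]
  · rw [if_neg hq]; symm
    rw [pv_flatMap_congr_mem _ _ (fun _ => []) fun r _ => ?_, pv_flatMap_empty]
    rw [pv_flatMap_congr_mem _ _ (fun _ => []) fun s _ => by
      rw [if_neg (by rw [beq_iff_eq, pv_card4]; tauto)], pv_flatMap_empty]

-- ===== the flattened solution streams of the two programs =====
def pvZlistA (x w y : List Int) : List (List (List Int)) :=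
  (pvMatrizA.filter fun z =>
    (PySem.Set.ofList (((x ++ w) ++ y) ++ z)).length == 16).map fun z => [x, w, y, z]

def pvYlistA (x w : List Int) : List (List (List Int)) :=
  pvMatrizA.flatMap fun y =>
    if (PySem.Set.ofList ((x ++ w) ++ y)).length == 12 then pvZlistA x w y else []

def pvWlistA (x : List Int) : List (List (List Int)) :=
  pvMatrizA.flatMap fun w =>
    if (PySem.Set.ofList (x ++ w)).length == 8 then pvYlistA x w else []

def pvLA : List (List (List Int)) := pvMatrizA.flatMap fun x => pvWlistA x

def pvYstream (x w : List Int) (sxw : PySem.Set Int) : List (List (List Int)) :=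
  pvRowsB.flatMap fun y =>
    if PySem.Set.isdisjoint sxw y then
      ((pvPerms4 ((PySem.List.pyRange 1 17 1).filter fun v =>
        !(PySem.Set.contains (PySem.Set.union sxw y) v))).map fun z => [x, w, y, z])
    else []

def pvWstream (x : List Int) (sx : PySem.Set Int) : List (List (List Int)) :=
  pvRowsB.flatMap fun w =>
    if PySem.Set.isdisjoint sx w then pvYstream x w (PySem.Set.union sx w) else []

def pvLB : List (List (List Int)) :=
  pvRowsB.flatMap fun x => pvWstream x (PySem.Set.ofList x)

lemma pv_LA_eq_LB : pvLA = pvLB := by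
  unfold pvLA pvWlistA pvYlistA pvZlistA pvLB pvWstream pvYstream
  rw [pv_rows_eq]
  refine pv_flatMap_congr_mem _ _ _ fun x hxm => ?_
  have hx := pv_rowOK_matriz x hxm
  refine pv_flatMap_congr_mem _ _ _ fun w hwm => ?_
  have hw := pv_rowOK_matriz w hwm
  rw [← pv_guardW x w hx hw]
  by_cases h8 : ((PySem.Set.ofList (x ++ w)).length == 8) = true
  · rw [if_pos h8, if_pos h8]
    have h8c : (x ++ w).toFinset.card = 8 := by
      rw [← pv_setLen]; exact beq_iff_eq.mp h8
    refine pv_flatMap_congr_mem _ _ _ fun y hym => ?_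
    have hy := pv_rowOK_matriz y hym
    rw [← pv_guardY x w y hy h8c]
    by_cases h12 : ((PySem.Set.ofList ((x ++ w) ++ y)).length == 12) = true
    · rw [if_pos h12, if_pos h12]
      have h12c : ((x ++ w) ++ y).toFinset.card = 12 := by
        rw [← pv_setLen]; exact beq_iff_eq.mp h12
      rw [pv_zlist_eq x w y hx hw hy h12c, pv_rest_eq, pv_perms4_quad]
    · rw [if_neg h12, if_neg h12]
  · rw [if_neg h8, if_neg h8]

-- ===== A's nested search is an early-return run over pvLA =====
def pvRun (testes : Int) :
    List (List (List Int)) → List (List (List Int)) × Int →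
      (List (List (List Int)) × Int) ⊕ (List (List (List Int)))
  | [], st => Sum.inl st
  | s :: ss, (achado, cnt) =>
    if cnt + 1 == testes then Sum.inr (achado ++ [s])
    else pvRun testes ss (achado ++ [s], cnt + 1)

lemma pv_run_append (testes : Int) (l1 l2 : List (List (List Int)))
    (st : List (List (List Int)) × Int) :
    pvRun testes (l1 ++ l2) st
      = match pvRun testes l1 st with
        | Sum.inl st' => pvRun testes l2 st'
        | Sum.inr r => Sum.inr r := by
  induction l1 generalizing st with
  | nil => rfl
  | cons s t ih =>
    obtain ⟨achado, cnt⟩ := st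
    simp only [List.cons_append, pvRun]
    by_cases h : cnt + 1 = testes <;> simp [h, ih]

lemma pv_match_congr (E : (List (List (List Int)) × Int) ⊕ (List (List (List Int))))
    (f g : List (List (List Int)) × Int → (List (List (List Int)) × Int) ⊕ (List (List (List Int))))
    (h : ∀ st', f st' = g st') :
    (match E with | Sum.inl st' => f st' | Sum.inr r => Sum.inr r)
      = match E with | Sum.inl st' => g st' | Sum.inr r => Sum.inr r := by
  cases E with
  | inl st' => exact h st'
  | inr r => rfl

lemma pv_aZ_run (testes : Int) (x w y : List Int) :
    ∀ (zs : List (List Int)) (st : List (List (List Int)) × Int),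
      pvAloopZ testes x w y zs st
        = pvRun testes
            ((zs.filter fun z => (PySem.Set.ofList (((x ++ w) ++ y) ++ z)).length == 16).map
              fun z => [x, w, y, z]) st := by
  intro zs
  induction zs with
  | nil => intro st; rfl
  | cons z t ih =>
    intro st
    obtain ⟨achado, cnt⟩ := st
    by_cases h : (PySem.Set.ofList (x ++ (w ++ (y ++ z)))).length = 16
    · by_cases h2 : cnt + 1 = testes <;>
        simp [pvAloopZ, pvRun, h, h2, ih]
    · simp [pvAloopZ, h, ih]

lemma pv_aY_run (testes : Int) (x w : List Int) :
    ∀ (ys : List (List Int)) (st : List (List (List Int)) × Int),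
      pvAloopY testes pvMatrizA x w ys st
        = pvRun testes
            (ys.flatMap fun y =>
              if (PySem.Set.ofList ((x ++ w) ++ y)).length == 12 then pvZlistA x w y
              else []) st := by
  intro ys
  induction ys with
  | nil => intro st; rfl
  | cons y t ih =>
    intro st
    simp only [pvAloopY, List.flatMap_cons]
    by_cases h : ((PySem.Set.ofList ((x ++ w) ++ y)).length == 12) = true
    · rw [if_pos h, if_pos h, pv_run_append, pvZlistA, pv_aZ_run]
      exact pv_match_congr _ _ _ fun st' => ih st'
    · rw [if_neg h, if_neg h, List.nil_append, ih]

lemma pv_aW_run (testes : Int) (x : List Int) :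
    ∀ (ws : List (List Int)) (st : List (List (List Int)) × Int),
      pvAloopW testes pvMatrizA x ws st
        = pvRun testes
            (ws.flatMap fun w =>
              if (PySem.Set.ofList (x ++ w)).length == 8 then pvYlistA x w
              else []) st := by
  intro ws
  induction ws with
  | nil => intro st; rfl
  | cons w t ih =>
    intro st
    simp only [pvAloopW, List.flatMap_cons]
    by_cases h : ((PySem.Set.ofList (x ++ w)).length == 8) = true
    · rw [if_pos h, if_pos h, pv_run_append, pvYlistA, pv_aY_run]
      exact pv_match_congr _ _ _ fun st' => ih st'
    · rw [if_neg h, if_neg h, List.nil_append, ih]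

lemma pv_aX_run (testes : Int) :
    ∀ (xs : List (List Int)) (st : List (List (List Int)) × Int),
      pvAloopX testes pvMatrizA xs st
        = pvRun testes (xs.flatMap fun x => pvWlistA x) st := by
  intro xs
  induction xs with
  | nil => intro st; rfl
  | cons x t ih =>
    intro st
    simp only [pvAloopX, List.flatMap_cons]
    rw [pv_run_append, pvWlistA, pv_aW_run]
    exact pv_match_congr _ _ _ fun st' => ih st'

lemma pv_run_spec (testes : Int) :
    ∀ (L : List (List (List Int))) (achado : List (List (List Int))) (cnt : Int),
      pvRun testes L (achado, cnt)
        = if 0 < testes - cnt ∧ testes - cnt ≤ (L.length : Int)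
          then Sum.inr (achado ++ L.take (testes - cnt).toNat)
          else Sum.inl (achado ++ L, cnt + L.length) := by
  intro L
  induction L with
  | nil =>
    intro achado cnt
    have hno : ¬(0 < testes - cnt ∧
        testes - cnt ≤ (([] : List (List (List Int))).length : Int)) := by
      simp only [List.length_nil, Nat.cast_zero]
      omega
    rw [if_neg hno]
    simp [pvRun]
  | cons s ss ih =>
    intro achado cnt
    simp only [pvRun]
    by_cases h : cnt + 1 = testes
    · rw [if_pos (by simpa using h), if_pos ⟨by omega, by simp; omega⟩]
      have h1 : (testes - cnt).toNat = 1 := by omega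
      rw [h1]
      simp
    · rw [if_neg (by simpa using h), ih]
      have hlen : ((s :: ss).length : Int) = (ss.length : Int) + 1 := by simp
      by_cases hc : 0 < testes - (cnt + 1) ∧ testes - (cnt + 1) ≤ (ss.length : Int)
      · rw [if_pos hc, if_pos ⟨by omega, by omega⟩]
        have h2 : (testes - cnt).toNat = (testes - (cnt + 1)).toNat + 1 := by omega
        rw [h2, List.take_succ_cons]
        simp
      · rw [if_neg hc, if_neg (by intro hcon; exact hc ⟨by omega, by omega⟩)]
        have h3 : cnt + 1 + (ss.length : Int) = cnt + ((s :: ss).length : Int) := by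
          rw [hlen]; ring
        rw [h3]
        simp

-- ===== B's budget-limited generation is a take of pvLB =====
lemma pv_genY_take (x w : List Int) (sxw : PySem.Set Int) :
    ∀ (ys : List (List Int)) (n : Nat),
      pvGenY x w sxw n ys
        = (ys.flatMap fun y =>
            if PySem.Set.isdisjoint sxw y then
              ((pvPerms4 ((PySem.List.pyRange 1 17 1).filter fun v =>
                !(PySem.Set.contains (PySem.Set.union sxw y) v))).map fun z => [x, w, y, z])
            else []).take n := by
  intro ys
  induction ys with
  | nil => intro n; simp [pvGenY]
  | cons y t ih =>
    intro n
    cases n with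
    | zero => simp [pvGenY]
    | succ m =>
      simp only [pvGenY, List.flatMap_cons]
      by_cases hd : PySem.Set.isdisjoint sxw y = true
      · rw [if_pos hd, if_pos hd, List.take_append, ih, List.length_take]
        congr 2
        omega
      · rw [if_neg hd, if_neg hd, List.nil_append, ih]

lemma pv_genY_rows (x w : List Int) (sxw : PySem.Set Int) (n : Nat) :
    pvGenY x w sxw n pvRowsB = (pvYstream x w sxw).take n := by
  rw [pv_genY_take]; rfl

lemma pv_genW_take (x : List Int) (sx : PySem.Set Int) :
    ∀ (ws : List (List Int)) (n : Nat),
      pvGenW x sx pvRowsB n ws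
        = (ws.flatMap fun w =>
            if PySem.Set.isdisjoint sx w then pvYstream x w (PySem.Set.union sx w) else []).take n := by
  intro ws
  induction ws with
  | nil => intro n; simp [pvGenW]
  | cons w t ih =>
    intro n
    cases n with
    | zero => simp [pvGenW]
    | succ m =>
      simp only [pvGenW, List.flatMap_cons]
      by_cases hd : PySem.Set.isdisjoint sx w = true
      · rw [if_pos hd, if_pos hd, List.take_append, pv_genY_rows, ih, List.length_take]
        congr 2
        omega
      · rw [if_neg hd, if_neg hd, List.nil_append, ih]

lemma pv_genW_rows (x : List Int) (sx : PySem.Set Int) (n : Nat) :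
    pvGenW x sx pvRowsB n pvRowsB = (pvWstream x sx).take n := by
  rw [pv_genW_take]; rfl

lemma pv_genX_take :
    ∀ (xs : List (List Int)) (n : Nat),
      pvGenX pvRowsB n xs = (xs.flatMap fun x => pvWstream x (PySem.Set.ofList x)).take n := by
  intro xs
  induction xs with
  | nil => intro n; simp [pvGenX]
  | cons x t ih =>
    intro n
    cases n with
    | zero => simp [pvGenX]
    | succ m =>
      simp only [pvGenX, List.flatMap_cons]
      rw [List.take_append, pv_genW_rows, ih, List.length_take]
      congr 2
      omega

lemma pv_genX_rows (n : Nat) : pvGenX pvRowsB n pvRowsB = pvLB.take n := by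
  rw [pv_genX_take]; rfl

-- ===== the two closed forms =====
lemma pv_gerador_closed (testes : Int) :
    gerador_old testes
      = if 0 < testes ∧ testes ≤ (pvLA.length : Int)
        then some (pvLA.take testes.toNat) else none := by
  unfold gerador_old
  rw [pv_aX_run testes pvMatrizA ([], 0),
      show (pvMatrizA.flatMap fun x => pvWlistA x) = pvLA from rfl,
      pv_run_spec testes pvLA [] 0]
  rw [sub_zero, List.nil_append, List.nil_append]
  split_ifs with h
  · rfl
  · rfl

lemma pv_alt_closed (testes : Int) :
    gerador_old_alt testes
      = if testes < 1 then none
        else if ((pvLB.take testes.toNat).length : Int) == testes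
          then some (pvLB.take testes.toNat) else none := by
  unfold gerador_old_alt
  rw [pv_genX_rows]

-- ===== VERDICT (by name: the statement is the Claim_ definition above) =====
theorem gerador_old_spec : Claim_equal_gerador_old := by
  intro testes _
  unfold Spec_gerador_old
  rw [pv_gerador_closed, pv_alt_closed, ← pv_LA_eq_LB]
  by_cases h1 : testes < 1
  · rw [if_pos h1,
      if_neg (by omega : ¬(0 < testes ∧ testes ≤ (pvLA.length : Int)))]
  · rw [if_neg h1]
    by_cases h2 : testes ≤ (pvLA.length : Int)
    · have hb : (((pvLA.take testes.toNat).length : Int) == testes) = true := by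
        rw [beq_iff_eq, List.length_take]
        push_cast
        omega
      rw [if_pos (⟨by omega, h2⟩ : 0 < testes ∧ testes ≤ (pvLA.length : Int)), hb,
          if_pos rfl]
    · have hb : (((pvLA.take testes.toNat).length : Int) == testes) = false := by
        rw [beq_eq_false_iff_ne, List.length_take]
        push_cast
        omega
      rw [if_neg (fun hcon => h2 hcon.2), hb, if_neg (by simp)]
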